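-- pv_equiv track=rewrite | github.com/bubblegumisnice/chinese-text-lexical-analyser | app.py | render_sentence_segmented_tokens
-- ===== SOURCE A (Python) =====
-- def render_sentence_segmented_tokens(tokens, word_positions, sentence_spans):
--     sentence_lines = []
--
--     for idx, (s_start, s_end) in enumerate(sentence_spans, start=1):
--         sentence_tokens = []
--         for token, (w_start, w_end) in zip(tokens, word_positions):
--             if w_end <= s_start or w_start >= s_end:
--                 continue
--             sentence_tokens.append(token)
--
--         if not sentence_tokens:
--             continue
--
--         sentence_lines.append(f"Sentence {idx}:  {' ｜ '.join(sentence_tokens)}")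
--
--     return sentence_lines
-- ===== SOURCE B (Python) =====
-- def render_sentence_segmented_tokens(tokens, word_positions, sentence_spans):
--     # Transposed traversal: one pass over the tokens, distributing each token
--     # into per-sentence buckets, then one pass rendering the non-empty buckets.
--     buckets = [[] for _ in sentence_spans]
--     for token, (w_start, w_end) in zip(tokens, word_positions):
--         buckets = [b + [token] if w_start < s_end and w_end > s_start else b
--                    for b, (s_start, s_end) in zip(buckets, sentence_spans)]
--     return [f"Sentence {i}:  {' ｜ '.join(b)}"
--             for i, b in enumerate(buckets, start=1) if b]
-- ===== Notes on version B (the rewrite author's own statement) =====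
-- stated objective: alternative
-- what changed: B inverts the loop nesting: instead of rescanning all tokens for every sentence span, it makes one pass over the tokens distributing each into per-span buckets (maintained functionally by a zip comprehension), then renders the non-empty buckets in one final pass.
import Mathlib
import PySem

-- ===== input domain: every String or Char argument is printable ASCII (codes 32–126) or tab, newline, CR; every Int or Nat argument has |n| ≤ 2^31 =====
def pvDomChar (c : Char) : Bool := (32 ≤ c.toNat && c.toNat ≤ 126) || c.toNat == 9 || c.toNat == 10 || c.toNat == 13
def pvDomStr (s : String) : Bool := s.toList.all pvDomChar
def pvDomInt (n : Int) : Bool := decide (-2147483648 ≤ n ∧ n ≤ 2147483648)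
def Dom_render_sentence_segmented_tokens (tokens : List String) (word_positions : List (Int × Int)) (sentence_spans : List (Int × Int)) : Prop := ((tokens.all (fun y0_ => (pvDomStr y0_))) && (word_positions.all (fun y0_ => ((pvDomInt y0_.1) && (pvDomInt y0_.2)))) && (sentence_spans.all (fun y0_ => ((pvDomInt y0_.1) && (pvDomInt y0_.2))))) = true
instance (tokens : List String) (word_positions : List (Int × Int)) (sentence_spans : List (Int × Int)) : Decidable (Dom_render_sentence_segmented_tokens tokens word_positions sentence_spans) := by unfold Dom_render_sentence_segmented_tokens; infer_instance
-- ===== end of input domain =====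

-- B inverts A's loop nesting: one pass over the tokens distributes each token into
-- per-span buckets, then one pass renders the non-empty buckets (same cost, different traversal).

-- ===== PORT A =====
def render_sentence_segmented_tokens (tokens : List String) (word_positions : List (Int × Int)) (sentence_spans : List (Int × Int)) : List String :=
  (PySem.List.enumerate sentence_spans 1).foldl
    (fun sentence_lines p =>
      let sentence_tokens := (tokens.zip word_positions).foldl
        (fun st q =>
          if q.2.2 ≤ p.2.1 ∨ q.2.1 ≥ p.2.2 then st else st ++ [q.1]) []
      if sentence_tokens = [] then sentence_lines
      else sentence_lines ++
        ["Sentence " ++ PySem.Int.toStr p.1 ++ ":  " ++ PySem.Str.join " ｜ " sentence_tokens])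
    []

-- ===== PORT B =====
def render_sentence_segmented_tokens_alt (tokens : List String) (word_positions : List (Int × Int)) (sentence_spans : List (Int × Int)) : List String :=
  let buckets := (tokens.zip word_positions).foldl
    (fun bs q =>
      (bs.zip sentence_spans).map
        (fun r => if q.2.1 < r.2.2 ∧ q.2.2 > r.2.1 then r.1 ++ [q.1] else r.1))
    (sentence_spans.map (fun _ => ([] : List String)))
  (PySem.List.enumerate buckets 1).filterMap
    (fun p =>
      if p.2 = [] then none
      else some ("Sentence " ++ PySem.Int.toStr p.1 ++ ":  " ++ PySem.Str.join " ｜ " p.2))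

-- ===== PRECONDITION & SPEC =====
def Spec_render_sentence_segmented_tokens (tokens : List String) (word_positions : List (Int × Int)) (sentence_spans : List (Int × Int)) (out : List String) : Prop := out = render_sentence_segmented_tokens_alt tokens word_positions sentence_spans
instance (tokens : List String) (word_positions : List (Int × Int)) (sentence_spans : List (Int × Int)) (out : List String) : Decidable (Spec_render_sentence_segmented_tokens tokens word_positions sentence_spans out) := by unfold Spec_render_sentence_segmented_tokens; infer_instance

-- ===== CLAIM (what is proved, stated in full; the proofs are below) =====
def Claim_equal_render_sentence_segmented_tokens : Prop := ∀ (tokens : List String) (word_positions : List (Int × Int)) (sentence_spans : List (Int × Int)), Dom_render_sentence_segmented_tokens tokens word_positions sentence_spans → Spec_render_sentence_segmented_tokens tokens word_positions sentence_spans (render_sentence_segmented_tokens tokens word_positions sentence_spans)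

-- ===== LEMMAS AND PROOFS =====

-- the tokens of one sentence span, in token order
def pvSel (zs : List (String × Int × Int)) (sp : Int × Int) : List String :=
  (zs.filter (fun q => decide (q.2.1 < sp.2 ∧ q.2.2 > sp.1))).map (·.1)

theorem pvSel_nil (sp : Int × Int) : pvSel [] sp = [] := rfl

theorem pvSel_cons (q : String × Int × Int) (zs : List (String × Int × Int)) (sp : Int × Int) :
    pvSel (q :: zs) sp =
      if q.2.1 < sp.2 ∧ q.2.2 > sp.1 then q.1 :: pvSel zs sp else pvSel zs sp := by
  by_cases h : q.2.1 < sp.2 ∧ q.2.2 > sp.1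
  · simp [pvSel, h]
  · simp [pvSel, h]

-- A's inner loop computes pvSel
theorem innerA_eq (zs : List (String × Int × Int)) (s1 s2 : Int) (st0 : List String) :
    zs.foldl (fun st q => if q.2.2 ≤ s1 ∨ q.2.1 ≥ s2 then st else st ++ [q.1]) st0
      = st0 ++ pvSel zs (s1, s2) := by
  induction zs generalizing st0 with
  | nil => simp [pvSel]
  | cons q zs ih =>
    simp only [List.foldl_cons, pvSel_cons]
    by_cases h : q.2.2 ≤ s1 ∨ q.2.1 ≥ s2
    · rw [if_pos h, if_neg (by omega), ih]
    · rw [if_neg h, if_pos (by omega), ih]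
      simp

theorem map_zip_eq_zipWith {α β γ : Type} (f : α × β → γ) (xs : List α) (ys : List β) :
    (xs.zip ys).map f = List.zipWith (fun a b => f (a, b)) xs ys := by
  induction xs generalizing ys with
  | nil => simp
  | cons x xs ih => cases ys <;> simp [ih]

theorem zipWith_comp {α β γ δ : Type} (f : γ → β → δ) (g : α → β → γ)
    (xs : List α) (ys : List β) :
    List.zipWith f (List.zipWith g xs ys) ys = List.zipWith (fun a b => f (g a b) b) xs ys := by
  induction xs generalizing ys with
  | nil => simp
  | cons x xs ih => cases ys <;> simp [ih]

theorem zipWith_fst {α β : Type} (xs : List α) (ys : List β) (h : xs.length = ys.length) :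
    List.zipWith (fun a _ => a) xs ys = xs := by
  induction xs generalizing ys with
  | nil => simp
  | cons x xs ih =>
    cases ys with
    | nil => simp at h
    | cons y ys => simp_all

-- B's bucket loop, characterised
theorem buckets_eq (zs : List (String × Int × Int)) (spans : List (Int × Int))
    (bs0 : List (List String)) (h : bs0.length = spans.length) :
    zs.foldl
      (fun bs q =>
        (bs.zip spans).map
          (fun r => if q.2.1 < r.2.2 ∧ q.2.2 > r.2.1 then r.1 ++ [q.1] else r.1))
      bs0
      = List.zipWith (fun b sp => b ++ pvSel zs sp) bs0 spans := by
  induction zs generalizing bs0 with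
  | nil =>
    simp only [List.foldl_nil, pvSel_nil, List.append_nil]
    exact (zipWith_fst bs0 spans h).symm
  | cons q zs ih =>
    simp only [List.foldl_cons]
    rw [map_zip_eq_zipWith, ih, zipWith_comp]
    · congr 1
      funext b sp
      rw [pvSel_cons]
      split_ifs <;> simp
    · simp [h]

theorem enumerate_map {α β : Type} (g : α → β) (xs : List α) (s : Int) :
    PySem.List.enumerate (xs.map g) s
      = (PySem.List.enumerate xs s).map (fun p => (p.1, g p.2)) := by
  induction xs generalizing s with
  | nil => simp [PySem.List.enumerate_nil]
  | cons x xs ih => simp [PySem.List.enumerate_cons, ih]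

theorem foldl_append_ite_eq_filterMap {α β : Type} (c : α → Prop) [DecidablePred c]
    (f : α → β) (l : List α) (acc : List β) :
    l.foldl (fun out x => if c x then out else out ++ [f x]) acc
      = acc ++ l.filterMap (fun x => if c x then none else some (f x)) := by
  induction l generalizing acc with
  | nil => simp
  | cons x l ih =>
    simp only [List.foldl_cons, List.filterMap_cons]
    by_cases h : c x
    · simp [h, ih]
    · simp [h, ih]

-- ===== VERDICT (by name: the statement is the Claim_ definition above) =====
theorem render_sentence_segmented_tokens_spec : Claim_equal_render_sentence_segmented_tokens := by
  intro tokens word_positions sentence_spans _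
  unfold Spec_render_sentence_segmented_tokens
  simp only [render_sentence_segmented_tokens, render_sentence_segmented_tokens_alt]
  rw [buckets_eq _ _ _ (by simp)]
  have hb : List.zipWith (fun b sp => b ++ pvSel (tokens.zip word_positions) sp)
      (sentence_spans.map (fun _ => ([] : List String))) sentence_spans
      = sentence_spans.map (pvSel (tokens.zip word_positions)) := by
    rw [List.zipWith_map_left, List.zipWith_self]
    simp
  rw [hb, enumerate_map, List.filterMap_map]
  have hi : ∀ p : Int × Int × Int,
      ((tokens.zip word_positions).foldl
        (fun st q => if q.2.2 ≤ p.2.1 ∨ q.2.1 ≥ p.2.2 then st else st ++ [q.1]) [])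
      = pvSel (tokens.zip word_positions) p.2 := by
    intro p; obtain ⟨i, s1, s2⟩ := p; exact innerA_eq _ _ _ []
  calc (PySem.List.enumerate sentence_spans 1).foldl
        (fun sentence_lines p =>
          let sentence_tokens := (tokens.zip word_positions).foldl
            (fun st q => if q.2.2 ≤ p.2.1 ∨ q.2.1 ≥ p.2.2 then st else st ++ [q.1]) []
          if sentence_tokens = [] then sentence_lines
          else sentence_lines ++
            ["Sentence " ++ PySem.Int.toStr p.1 ++ ":  " ++
              PySem.Str.join " ｜ " sentence_tokens]) []
      = (PySem.List.enumerate sentence_spans 1).foldl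
        (fun sentence_lines p =>
          if pvSel (tokens.zip word_positions) p.2 = [] then sentence_lines
          else sentence_lines ++
            ["Sentence " ++ PySem.Int.toStr p.1 ++ ":  " ++
              PySem.Str.join " ｜ " (pvSel (tokens.zip word_positions) p.2)]) [] := by
        congr 1
        funext sentence_lines p
        simp only [hi p]
    _ = (PySem.List.enumerate sentence_spans 1).filterMap
        (fun p =>
          if pvSel (tokens.zip word_positions) p.2 = [] then none
          else some ("Sentence " ++ PySem.Int.toStr p.1 ++ ":  " ++
            PySem.Str.join " ｜ " (pvSel (tokens.zip word_positions) p.2))) := by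
        rw [foldl_append_ite_eq_filterMap
          (fun p : Int × (Int × Int) => pvSel (tokens.zip word_positions) p.2 = [])]
        simp
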